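-- pv_equiv track=rewrite | github.com/barstowlab/emp-to-jet | balance/utils/balanceUtils.py | GenerateMergedIOStatusList
-- ===== SOURCE A (Python) =====
-- def GenerateMergedIOStatusList(uniqueCompounds, iostatusCO2, iostatusAA):
--
-- 	ioStatusCO2Dict = {}
-- 	ioStatusAADict = {}
--
-- 	for line in iostatusCO2:
-- 		ioStatusCO2Dict[line[0]] = line[1]
--
-- 	for line in iostatusAA:
-- 		ioStatusAADict[line[0]] = line[1]
--
--
-- 	ioStatusCO2DictKeys = ioStatusCO2Dict.keys()
-- 	ioStatusAADictKeys = ioStatusAADict.keys()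
--
-- 	mergedIOStatus = []
--
-- 	for compound in uniqueCompounds:
--
-- 		if compound in ioStatusCO2DictKeys and compound not in ioStatusAADictKeys:
-- 			mergedIOStatus.append(ioStatusCO2Dict[compound])
--
-- 		elif compound not in ioStatusCO2DictKeys and compound in ioStatusAADictKeys:
-- 			mergedIOStatus.append(ioStatusAADict[compound])
--
-- 		elif compound in ioStatusCO2DictKeys and compound in ioStatusAADictKeys:
-- 			mergedIOStatus.append(ioStatusCO2Dict[compound])
--
-- 		else:
-- 			mergedIOStatus.append('Intermediate')
--
--
-- 	return mergedIOStatus, ioStatusCO2Dict, ioStatusAADict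
-- ===== SOURCE B (Python) =====
-- def GenerateMergedIOStatusList(uniqueCompounds, iostatusCO2, iostatusAA):
-- 	ioStatusCO2Dict = dict(iostatusCO2)
-- 	ioStatusAADict = dict(iostatusAA)
--
-- 	# index every compound to its positions in uniqueCompounds
-- 	positions = {}
-- 	for i, compound in enumerate(uniqueCompounds):
-- 		positions.setdefault(compound, []).append(i)
--
-- 	# start from all-'Intermediate', then scatter AA statuses, then CO2 statuses (CO2 overrides)
-- 	mergedIOStatus = ['Intermediate'] * len(uniqueCompounds)
-- 	for pairs in (iostatusAA, iostatusCO2):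
-- 		for compound, status in pairs:
-- 			for i in positions.get(compound, []):
-- 				mergedIOStatus[i] = status
--
-- 	return mergedIOStatus, ioStatusCO2Dict, ioStatusAADict
-- ===== Notes on version B (the rewrite author's own statement) =====
-- stated objective: alternative
-- what changed: B inverts the traversal: it indexes each compound's positions in uniqueCompounds once, starts from an all-'Intermediate' result, and scatters statuses into it by position while looping over the AA then the CO2 status lists (CO2 written last so it overrides), instead of A's per-compound four-branch membership chain over two dicts.
import Mathlib
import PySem

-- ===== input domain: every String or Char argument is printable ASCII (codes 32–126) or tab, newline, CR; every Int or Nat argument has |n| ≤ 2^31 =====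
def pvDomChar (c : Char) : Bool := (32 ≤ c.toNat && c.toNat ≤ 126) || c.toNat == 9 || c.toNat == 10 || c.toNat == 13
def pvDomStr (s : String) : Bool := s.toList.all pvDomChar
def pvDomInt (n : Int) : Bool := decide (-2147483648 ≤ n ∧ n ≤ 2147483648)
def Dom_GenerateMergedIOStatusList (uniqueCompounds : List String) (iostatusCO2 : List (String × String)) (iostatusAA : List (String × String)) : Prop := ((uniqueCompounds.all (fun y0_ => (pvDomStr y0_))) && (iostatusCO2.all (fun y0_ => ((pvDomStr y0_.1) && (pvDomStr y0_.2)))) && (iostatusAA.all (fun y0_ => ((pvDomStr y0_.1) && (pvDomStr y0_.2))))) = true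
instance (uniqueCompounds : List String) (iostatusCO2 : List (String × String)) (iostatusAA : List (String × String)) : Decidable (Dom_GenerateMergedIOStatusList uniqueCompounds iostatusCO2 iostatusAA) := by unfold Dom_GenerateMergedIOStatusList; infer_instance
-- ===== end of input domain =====

-- B inverts the traversal: a positions index of uniqueCompounds, an all-'Intermediate' result, then statuses scattered in by position (AA then CO2, CO2 last so it overrides) — replacing A's per-compound four-branch membership chain; same cost.


-- ===== PORT A =====
def GenerateMergedIOStatusList (uniqueCompounds : List String) (iostatusCO2 : List (String × String)) (iostatusAA : List (String × String)) : List String × (List (String × String)) × (List (String × String)) :=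
  let ioStatusCO2Dict := iostatusCO2.foldl (fun d line => d.insert line.1 line.2) PySem.Dict.empty
  let ioStatusAADict := iostatusAA.foldl (fun d line => d.insert line.1 line.2) PySem.Dict.empty
  -- dict[compound] inside a branch that guarantees the key is present: getD's default is never used
  let mergedIOStatus := uniqueCompounds.foldl (fun acc compound =>
    if ioStatusCO2Dict.contains compound && !(ioStatusAADict.contains compound) then
      acc ++ [ioStatusCO2Dict.getD compound ""]
    else if !(ioStatusCO2Dict.contains compound) && ioStatusAADict.contains compound then
      acc ++ [ioStatusAADict.getD compound ""]
    else if ioStatusCO2Dict.contains compound && ioStatusAADict.contains compound then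
      acc ++ [ioStatusCO2Dict.getD compound ""]
    else
      acc ++ ["Intermediate"]) []
  (mergedIOStatus, ioStatusCO2Dict.items, ioStatusAADict.items)

-- ===== PORT B =====
def GenerateMergedIOStatusList_alt (uniqueCompounds : List String) (iostatusCO2 : List (String × String)) (iostatusAA : List (String × String)) : List String × (List (String × String)) × (List (String × String)) :=
  let ioStatusCO2Dict := PySem.Dict.ofList iostatusCO2
  let ioStatusAADict := PySem.Dict.ofList iostatusAA
  -- positions.setdefault(c, []).append(i)  =  positions[c] = positions.get(c, []) + [i]  (Dict.modify)
  let positions := (PySem.List.enumerate uniqueCompounds).foldl (fun d p => d.modify p.2 [] (· ++ [p.1])) PySem.Dict.empty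
  let res0 := List.replicate uniqueCompounds.length "Intermediate"
  -- indices stored in positions come from enumerate, hence are ≥ 0: i.toNat is exact here
  let mergedIOStatus := [iostatusAA, iostatusCO2].foldl (fun r pairs =>
    pairs.foldl (fun r p => (positions.getD p.1 []).foldl (fun r i => r.set i.toNat p.2) r) r) res0
  (mergedIOStatus, ioStatusCO2Dict.items, ioStatusAADict.items)

-- ===== PRECONDITION & SPEC =====
def Spec_GenerateMergedIOStatusList (uniqueCompounds : List String) (iostatusCO2 : List (String × String)) (iostatusAA : List (String × String)) (out : List String × (List (String × String)) × (List (String × String))) : Prop := out = GenerateMergedIOStatusList_alt uniqueCompounds iostatusCO2 iostatusAA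
instance (uniqueCompounds : List String) (iostatusCO2 : List (String × String)) (iostatusAA : List (String × String)) (out : List String × (List (String × String)) × (List (String × String))) : Decidable (Spec_GenerateMergedIOStatusList uniqueCompounds iostatusCO2 iostatusAA out) := by unfold Spec_GenerateMergedIOStatusList; infer_instance

-- ===== CLAIM (what is proved, stated in full; the proofs are below) =====
def Claim_equal_GenerateMergedIOStatusList : Prop := ∀ (uniqueCompounds : List String) (iostatusCO2 : List (String × String)) (iostatusAA : List (String × String)), Dom_GenerateMergedIOStatusList uniqueCompounds iostatusCO2 iostatusAA → Spec_GenerateMergedIOStatusList uniqueCompounds iostatusCO2 iostatusAA (GenerateMergedIOStatusList uniqueCompounds iostatusCO2 iostatusAA)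

-- ===== LEMMAS AND PROOFS =====

-- A's per-compound branch chain is the pointwise merged (CO2-first) lookup
theorem loopA_eq_map (d1 d2 : PySem.Dict String String) (uc : List String) (acc : List String) :
    uc.foldl (fun acc compound =>
      if d1.contains compound && !(d2.contains compound) then acc ++ [d1.getD compound ""]
      else if !(d1.contains compound) && d2.contains compound then acc ++ [d2.getD compound ""]
      else if d1.contains compound && d2.contains compound then acc ++ [d1.getD compound ""]
      else acc ++ ["Intermediate"]) acc
      = acc ++ uc.map (fun c => ((d1.get? c).or (d2.get? c)).getD "Intermediate") := by
  induction uc generalizing acc with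
  | nil => simp
  | cons c uc ih =>
      simp only [List.foldl_cons, List.map_cons]
      rw [ih]
      cases h1 : d1.get? c <;> cases h2 : d2.get? c <;>
        simp [PySem.Dict.contains_eq_isSome_get?, h1, h2,
              PySem.Dict.getD_eq_get?_getD, List.append_assoc]

-- the positions index holds, per compound, exactly its enumerate indices
theorem getD_positions (uc : List String) (c : String) :
    ((PySem.List.enumerate uc).foldl (fun d p => d.modify p.2 [] (· ++ [p.1])) PySem.Dict.empty).getD c []
      = ((PySem.List.enumerate uc).filter (fun p => p.2 == c)).map (·.1) := by
  rw [show (PySem.List.enumerate uc).foldl (fun d p => d.modify p.2 [] (· ++ [p.1])) PySem.Dict.empty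
      = ((PySem.List.enumerate uc).map Prod.swap).foldl (fun d q => d.modify q.1 [] (· ++ [q.2])) PySem.Dict.empty from by rw [List.foldl_map]; rfl]
  rw [PySem.Dict.getD_foldl_modify_append]
  simp only [PySem.Dict.getD_empty, List.nil_append, List.filter_map, List.map_map]
  rfl

theorem mem_positions_iff (uc : List String) (c : String) (j : Int) :
    j ∈ ((PySem.List.enumerate uc).filter (fun p => p.2 == c)).map (·.1)
      ↔ ∃ k : Nat, k < uc.length ∧ j = (k : Int) ∧ uc[k]? = some c := by
  constructor
  · intro h
    obtain ⟨p, hp, hj⟩ := List.mem_map.mp h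
    obtain ⟨hpe, hpc⟩ := List.mem_filter.mp hp
    obtain ⟨k, hk, hpk⟩ := (PySem.List.mem_enumerate_iff _ _ _).mp hpe
    refine ⟨k, hk, ?_, ?_⟩
    · rw [← hj, hpk]; simp
    · rw [List.getElem?_eq_getElem hk]
      have : p.2 = c := by simpa using hpc
      rw [hpk] at this; simpa using this
  · rintro ⟨k, hk, hj, hc⟩
    refine List.mem_map.mpr ⟨((0 : Int) + k, uc[k]), List.mem_filter.mpr ⟨?_, ?_⟩, by simp [hj]⟩
    · exact (PySem.List.mem_enumerate_iff _ _ _).mpr ⟨k, hk, rfl⟩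
    · have : uc[k] = c := by rw [List.getElem?_eq_getElem hk] at hc; exact Option.some.inj hc
      simp [this]

-- reading back a scatter of v over an index list of nonnegative indices
theorem getElem?_foldl_set (idxs : List Int) (v : String) (r : List String) (j : Nat)
    (hnn : ∀ i ∈ idxs, 0 ≤ i) :
    (idxs.foldl (fun r i => r.set i.toNat v) r)[j]?
      = if (j : Int) ∈ idxs then (r[j]?.map (fun _ => v)) else r[j]? := by
  induction idxs generalizing r with
  | nil => simp
  | cons i idxs ih =>
      have h0 : (0:Int) ≤ i := hnn i (List.mem_cons_self)
      simp only [List.foldl_cons]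
      rw [ih _ (fun x hx => hnn x (List.mem_cons_of_mem _ hx)), List.getElem?_set']
      by_cases hm : (j:Int) ∈ idxs
      · rw [if_pos hm, if_pos (List.mem_cons.mpr (Or.inr hm))]
        by_cases hij : i.toNat = j
        · rw [if_pos hij]; cases r[j]? <;> rfl
        · rw [if_neg hij]
      · by_cases hij : i.toNat = j
        · rw [if_neg hm, if_pos hij,
              if_pos (List.mem_cons.mpr (Or.inl (by omega)))]
          cases r[j]? <;> rfl
        · rw [if_neg hm, if_neg hij,
              if_neg (fun hmem => (List.mem_cons.mp hmem).elim (fun h => absurd h (by omega)) hm)]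

-- scattering v into every position of c turns a pointwise map into the updated map
theorem scatter_eq_map (uc : List String) (c v : String) (g : String → String) :
    (((PySem.List.enumerate uc).foldl (fun d p => d.modify p.2 [] (· ++ [p.1])) PySem.Dict.empty).getD c []).foldl
        (fun r i => r.set i.toNat v) (uc.map g)
      = uc.map (fun x => if x = c then v else g x) := by
  rw [getD_positions]
  apply List.ext_getElem?
  intro j
  rw [getElem?_foldl_set _ _ _ _ (fun i hi => by
        obtain ⟨k, _, hk, _⟩ := (mem_positions_iff uc c i).mp hi; omega)]
  by_cases hlt : j < uc.length
  · have hmem : ((j:Int) ∈ ((PySem.List.enumerate uc).filter (fun p => p.2 == c)).map (·.1)) ↔ uc[j] = c := by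
      rw [mem_positions_iff]
      constructor
      · rintro ⟨k, hk, hjk, hc⟩
        have : k = j := by omega
        subst this; simpa [List.getElem?_eq_getElem hk] using hc
      · intro h; exact ⟨j, hlt, rfl, by simp [List.getElem?_eq_getElem hlt, h]⟩
    by_cases h : uc[j] = c <;>
      simp [hmem, h, List.getElem?_eq_getElem, hlt]
  · have h1 : (uc.map g)[j]? = none := by simp [List.getElem?_eq_none_iff]; omega
    have h2 : (uc.map (fun x => if x = c then v else g x))[j]? = none := by
      simp [List.getElem?_eq_none_iff]; omega
    split_ifs <;> simp [h1, h2]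

-- folding inserts on top of d: lookups see the folded pairs first, then d
theorem get?_foldl_insert_or (l : List (String × String)) (d : PySem.Dict String String) (k : String) :
    ((l.foldl (fun d p => d.insert p.1 p.2) d).get? k)
      = ((l.foldl (fun d p => d.insert p.1 p.2) PySem.Dict.empty).get? k).or (d.get? k) := by
  induction l generalizing d with
  | nil => simp [PySem.Dict.get?_empty]
  | cons p l ih =>
      simp only [List.foldl_cons]
      rw [ih (d.insert p.1 p.2), ih (PySem.Dict.empty.insert p.1 p.2),
          PySem.Dict.get?_insert, PySem.Dict.get?_insert]
      by_cases h : k = p.1 <;> simp [h, PySem.Dict.get?_empty]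

-- scatter-processing a pair list = overriding the map by the list's (last-wins) lookups
theorem loopB_pairs (uc : List String) (L : List (String × String)) (g : String → String) :
    L.foldl (fun r p =>
        (((PySem.List.enumerate uc).foldl (fun d p => d.modify p.2 [] (· ++ [p.1])) PySem.Dict.empty).getD p.1 []).foldl
          (fun r i => r.set i.toNat p.2) r) (uc.map g)
      = uc.map (fun x => ((PySem.Dict.ofList L).get? x).getD (g x)) := by
  induction L generalizing g with
  | nil =>
      rw [show PySem.Dict.ofList ([] : List (String × String)) = PySem.Dict.empty from rfl]
      simp [PySem.Dict.get?_empty]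
  | cons p L ih =>
      simp only [List.foldl_cons]
      rw [scatter_eq_map, ih]
      apply List.map_congr_left
      intro x _
      have hcons : PySem.Dict.ofList (p :: L) = L.foldl (fun d q => d.insert q.1 q.2) (PySem.Dict.empty.insert p.1 p.2) := rfl
      have hL : PySem.Dict.ofList L = L.foldl (fun d q => d.insert q.1 q.2) PySem.Dict.empty := rfl
      rw [hcons, get?_foldl_insert_or, ← hL, PySem.Dict.get?_insert]
      cases hx : (PySem.Dict.ofList L).get? x <;>
        by_cases h : x = p.1 <;> simp [h, PySem.Dict.get?_empty, hx]

-- ===== VERDICT (by name: the statement is the Claim_ definition above) =====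
theorem GenerateMergedIOStatusList_spec : Claim_equal_GenerateMergedIOStatusList := by
  intro uc co2 aa _
  unfold Spec_GenerateMergedIOStatusList GenerateMergedIOStatusList GenerateMergedIOStatusList_alt
  simp only []
  refine Prod.ext ?_ rfl
  rw [loopA_eq_map,
      show co2.foldl (fun d line => d.insert line.1 line.2) PySem.Dict.empty = PySem.Dict.ofList co2 from rfl,
      show aa.foldl (fun d line => d.insert line.1 line.2) PySem.Dict.empty = PySem.Dict.ofList aa from rfl,
      show List.replicate uc.length "Intermediate" = uc.map (fun _ => "Intermediate") from by simp]
  simp only [List.foldl_cons, List.foldl_nil]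
  rw [loopB_pairs, loopB_pairs]
  simp only [List.nil_append]
  apply List.map_congr_left
  intro x _
  cases h1 : (PySem.Dict.ofList co2).get? x <;> cases h2 : (PySem.Dict.ofList aa).get? x <;>
    simp [h1, h2]
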